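-- pv_equiv track=rewrite | github.com/JHaller27/model_maker | languages/csharp_generator.py | get_typing_imports
-- ===== SOURCE A (Python) =====
-- def get_typing_imports(types):
--     import_types = set()
--     for t in types:
--         if 'IEnumerable' in t:
--             import_types.add('System.Collections.Generic')
--
--     if len(import_types) == 0:
--         return None
--
--     return ''.join(f'using {it};\n' for it in import_types)
-- ===== SOURCE B (Python) =====
-- def get_typing_imports(types):
--     if any('IEnumerable' in t for t in types):
--         return 'using System.Collections.Generic;\n'
--     return None
-- ===== Notes on version B (the rewrite author's own statement) =====
-- stated objective: simpler
-- what changed: Replaces the set accumulation plus join-over-the-set with a single any() existence check returning a constant string, since the set can only ever hold 'System.Collections.Generic'.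
import Mathlib
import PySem

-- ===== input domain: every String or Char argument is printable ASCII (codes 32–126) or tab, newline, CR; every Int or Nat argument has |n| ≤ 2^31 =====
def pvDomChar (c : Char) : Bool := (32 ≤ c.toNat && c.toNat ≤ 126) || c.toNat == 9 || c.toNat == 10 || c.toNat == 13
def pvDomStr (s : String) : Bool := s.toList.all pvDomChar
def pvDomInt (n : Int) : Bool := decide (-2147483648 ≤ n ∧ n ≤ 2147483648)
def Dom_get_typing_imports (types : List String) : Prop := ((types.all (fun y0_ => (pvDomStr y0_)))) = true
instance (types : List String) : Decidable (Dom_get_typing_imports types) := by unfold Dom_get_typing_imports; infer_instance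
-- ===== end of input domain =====

-- ===== PORT A =====
-- One honest line: B replaces A's set accumulation + join with an any() existence check and a constant string (simpler).
def get_typing_imports (types : List String) : Option String :=
  let import_types : PySem.Set String :=
    types.foldl (fun s t =>
      if PySem.Str.isIn "IEnumerable" t then PySem.Set.add s "System.Collections.Generic" else s)
      PySem.Set.empty
  if PySem.Set.len import_types = 0 then none
  else some (PySem.Str.join "" (import_types.map (fun it => "using " ++ it ++ ";\n")))

-- ===== PORT B =====
def get_typing_imports_alt (types : List String) : Option String :=
  if types.any (fun t => PySem.Str.isIn "IEnumerable" t) then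
    some "using System.Collections.Generic;\n"
  else none

-- ===== PRECONDITION & SPEC =====
def Spec_get_typing_imports (types : List String) (out : Option String) : Prop := out = get_typing_imports_alt types
instance (types : List String) (out : Option String) : Decidable (Spec_get_typing_imports types out) := by unfold Spec_get_typing_imports; infer_instance

-- ===== CLAIM (what is proved, stated in full; the proofs are below) =====
def Claim_equal_get_typing_imports : Prop := ∀ (types : List String), Dom_get_typing_imports types → Spec_get_typing_imports types (get_typing_imports types)

-- ===== LEMMAS AND PROOFS =====
-- The loop's set is empty or the singleton, depending on whether any element matched so far.
theorem pv_loop_char (types : List String) : ∀ (s : List String),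
    (s = [] ∨ s = ["System.Collections.Generic"]) →
    types.foldl (fun s t =>
      if PySem.Str.isIn "IEnumerable" t then PySem.Set.add s "System.Collections.Generic" else s) s
    = (if s = ["System.Collections.Generic"] ∨ types.any (fun t => PySem.Str.isIn "IEnumerable" t)
       then ["System.Collections.Generic"] else []) := by
  induction types with
  | nil =>
    intro s hs
    rcases hs with h | h <;> subst h
    · rw [List.foldl_nil, if_neg] ; rintro (h | h) <;> simp_all
    · rw [List.foldl_nil, if_pos (Or.inl rfl)]
  | cons t ts ih =>
    intro s hs
    rw [List.foldl_cons]
    by_cases hm : PySem.Str.isIn "IEnumerable" t = true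
    · have hset : ∀ s', (s' = [] ∨ s' = ["System.Collections.Generic"]) →
          PySem.Set.add s' "System.Collections.Generic" = ["System.Collections.Generic"] := by
        rintro s' (rfl | rfl) <;> decide
      rw [if_pos hm, hset s hs, ih ["System.Collections.Generic"] (Or.inr rfl),
          if_pos (Or.inl rfl), if_pos (Or.inr (by rw [List.any_cons, hm, Bool.true_or]))]
    · have hf : PySem.Str.isIn "IEnumerable" t = false := Bool.eq_false_iff.mpr hm
      rw [if_neg hm, ih s hs, List.any_cons, hf, Bool.false_or]

-- ===== VERDICT (by name: the statement is the Claim_ definition above) =====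
theorem get_typing_imports_spec : Claim_equal_get_typing_imports := by
  intro types _
  show get_typing_imports types = get_typing_imports_alt types
  show (if PySem.Set.len (types.foldl (fun s t =>
          if PySem.Str.isIn "IEnumerable" t then PySem.Set.add s "System.Collections.Generic" else s)
          PySem.Set.empty) = 0 then none
        else some (PySem.Str.join "" ((types.foldl (fun s t =>
          if PySem.Str.isIn "IEnumerable" t then PySem.Set.add s "System.Collections.Generic" else s)
          PySem.Set.empty).map (fun it => "using " ++ it ++ ";\n"))))
      = get_typing_imports_alt types
  rw [pv_loop_char types PySem.Set.empty (Or.inl rfl)]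
  unfold get_typing_imports_alt
  by_cases h : (types.any (fun t => PySem.Str.isIn "IEnumerable" t)) = true
  · have hp : (PySem.Set.empty = ["System.Collections.Generic"] ∨
        (types.any (fun t => PySem.Str.isIn "IEnumerable" t)) = true) := Or.inr h
    rw [if_pos hp, if_pos h,
        if_neg (show ¬(PySem.Set.len ["System.Collections.Generic"] = 0) from by decide)]
    decide
  · have hp : ¬(PySem.Set.empty = ["System.Collections.Generic"] ∨
        (types.any (fun t => PySem.Str.isIn "IEnumerable" t)) = true) := by
      rintro (hc | hc)
      · exact absurd hc (by decide)
      · exact h hc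
    rw [if_neg hp, if_neg h, if_pos (show PySem.Set.len ([] : List String) = 0 from rfl)]
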